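-- pv_equiv track=rewrite | github.com/Honglongwu/EMBL-Visiting | TIFproteome/XTandem/output-Tryp-sixFrame-xml/pep-filter.py | check_IL
-- ===== SOURCE A (Python) =====
-- def check_IL(pep, D):
--     L = []
--     for i in range(len(pep)):
--         if pep[i] == 'I' or pep[i] == 'L':
--             L.append(i)
--
--     S = set()
--     S.add(pep)
--     for i in range(len(L)):
--         S2 = set()
--         for pep in S:
--             n = L[i]
--             pep1 = pep[0:n] + 'I' + pep[n+1:]
--             pep2 = pep[0:n] + 'L' + pep[n+1:]
--             S2.add(pep1)
--             S2.add(pep2)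
--         S = S2
--     res = []
--     for p in S:
--         for k in D:
--             if p in D:
--                 res.append(p)
--                 break
--     return res
-- ===== SOURCE B (Python) =====
-- def check_IL(pep, D):
--     # A key of D is kept iff it is pep with each I/L position freely I or L:
--     # scan the keys once instead of enumerating the 2^k variant set.
--     def _variant(k):
--         if len(k) != len(pep):
--             return False
--         return all(b == a or (a in 'IL' and b in 'IL') for a, b in zip(pep, k))
--     return [k for k in D if _variant(k)]
-- ===== Notes on version B (the rewrite author's own statement) =====
-- stated objective: faster
-- what changed: Instead of materialising the set of all 2^k I/L-variants of pep by repeated set-doubling and then filtering that set through D, B scans D's keys once and tests each key directly for being an I/L-variant of pep; Pre_ excludes inputs where two or more keys of D are variants, since there A's result order is CPython's set-iteration (hash) order.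
-- outside the precondition, e.g. on check_IL('II', {'II': 'x', 'IL': 'y'}): A returns ['IL', 'II'], B returns ['II', 'IL']
import Mathlib
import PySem

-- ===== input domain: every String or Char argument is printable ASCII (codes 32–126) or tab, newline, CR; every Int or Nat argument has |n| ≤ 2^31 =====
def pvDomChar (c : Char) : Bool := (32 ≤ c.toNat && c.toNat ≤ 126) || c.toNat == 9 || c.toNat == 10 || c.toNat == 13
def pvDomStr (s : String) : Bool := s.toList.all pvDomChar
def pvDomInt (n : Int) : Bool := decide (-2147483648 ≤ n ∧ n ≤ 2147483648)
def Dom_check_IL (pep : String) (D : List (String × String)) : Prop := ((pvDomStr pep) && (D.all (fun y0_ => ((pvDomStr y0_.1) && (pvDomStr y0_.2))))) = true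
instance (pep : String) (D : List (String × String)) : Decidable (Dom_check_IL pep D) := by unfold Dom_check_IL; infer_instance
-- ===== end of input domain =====

-- B replaces A's breadth-first enumeration of the 2^k I/L-variant set with one direct scan of D's
-- keys testing each key for being an I/L-variant of pep (objective: faster on peps with many I/L).

-- ===== PORT A =====

-- pep[0:n] + c + pep[n+1:]
def pvSubAt (u : String) (n : Int) (c : String) : String :=
  PySem.Str.slice u (some 0) (some n) ++ c ++ PySem.Str.slice u (some (n + 1)) none

-- one pass of A's doubling loop body: S2 built from S, substituting 'I' and 'L' at index n
def pvDouble (n : Int) (S : PySem.Set String) : PySem.Set String :=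
  S.foldl (fun S2 u => PySem.Set.add (PySem.Set.add S2 (pvSubAt u n "I")) (pvSubAt u n "L"))
    PySem.Set.empty

-- A's inner 'for k in D: if p in D: res.append(p); break'
def pvInnerGo (Dm : PySem.Dict String String) (p : String) (res : List String) :
    List String → List String
  | [] => res
  | _ :: t => if Dm.contains p then res ++ [p] else pvInnerGo Dm p res t

def check_IL (pep : String) (D : List (String × String)) : List String :=
  let Dm := PySem.Dict.ofList D
  let L : List Int :=
    (PySem.List.pyRange 0 (PySem.Str.len pep) 1).foldl
      (fun acc i =>
        if PySem.Str.pyGet? pep i == some 'I' || PySem.Str.pyGet? pep i == some 'L'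
        then acc ++ [i] else acc) []
  let S0 : PySem.Set String := PySem.Set.add PySem.Set.empty pep
  let S := (PySem.List.pyRange 0 (PySem.List.len L) 1).foldl
      (fun S i => pvDouble (PySem.List.pyGetD L i 0) S) S0
  S.foldl (fun res p => pvInnerGo Dm p res Dm.keys) []

-- ===== PORT B =====

def pvIsIL (c : Char) : Bool := c == 'I' || c == 'L'

-- B's _variant: len k == len pep and all(b == a or (a in 'IL' and b in 'IL') for a, b in zip(pep, k))
def pvVariant (pep k : String) : Bool :=
  (PySem.Str.len k == PySem.Str.len pep) &&
  (pep.toList.zip k.toList).all (fun ab => ab.2 == ab.1 || (pvIsIL ab.1 && pvIsIL ab.2))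

def check_IL_alt (pep : String) (D : List (String × String)) : List String :=
  (PySem.Dict.ofList D).keys.filter (fun k => pvVariant pep k)

-- ===== PRECONDITION & SPEC =====

-- Pre_ excludes inputs on which two or more keys of D are I/L-variants of pep: there A returns
-- those keys in CPython's set-iteration (hash) order, which is accidental and not modelled.
def Pre_check_IL (pep : String) (D : List (String × String)) : Prop :=
  ((PySem.Dict.ofList D).keys.filter (fun k => pvVariant pep k)).length ≤ 1

instance (pep : String) (D : List (String × String)) : Decidable (Pre_check_IL pep D) := by
  unfold Pre_check_IL; infer_instance

def pvWitness_check_IL : String × (List (String × String)) := ("AIB", [("ALB", "x")])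

def Spec_check_IL (pep : String) (D : List (String × String)) (out : List String) : Prop :=
  out = check_IL_alt pep D

instance (pep : String) (D : List (String × String)) (out : List String) :
    Decidable (Spec_check_IL pep D out) := by unfold Spec_check_IL; infer_instance

-- ===== CLAIM (what is proved, stated in full; the proofs are below) =====
def Claim_equal_check_IL : Prop := ∀ (pep : String) (D : List (String × String)),
    Dom_check_IL pep D → Pre_check_IL pep D → Spec_check_IL pep D (check_IL pep D)

-- ===== LEMMAS AND PROOFS =====

-- substitution on the list side
def pvSubL (l : List Char) (m : Nat) (c : Char) : List Char :=
  l.take m ++ c :: l.drop (m + 1)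

theorem pvToList_pvSubAt (u : String) (m : Nat) (c : String) :
    (pvSubAt u (m : Int) c).toList = u.toList.take m ++ c.toList ++ u.toList.drop (m + 1) := by
  have h1 : ((m : Int) + 1) = ((m + 1 : Nat) : Int) := by push_cast; ring
  unfold pvSubAt
  rw [String.toList_append, String.toList_append, PySem.Str.toList_slice, PySem.Str.toList_slice, h1]
  rw [PySem.Chars.slice_eq_listSlice, PySem.Chars.slice_eq_listSlice,
    PySem.List.slice_zero_start, PySem.List.slice_to_natCast, PySem.List.slice_from_natCast]

-- (pvSubAt u m cs).toList, when cs is the one-character string [c], is pvSubL u.toList m c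
theorem pvToList_pvSubAt' (u : String) (m : Nat) (cs : String) (c : Char) (h : cs.toList = [c]) :
    (pvSubAt u (m : Int) cs).toList = pvSubL u.toList m c := by
  rw [pvToList_pvSubAt, h, pvSubL]; simp

theorem pvLength_pvSubL (l : List Char) (m : Nat) (c : Char) (h : m < l.length) :
    (pvSubL l m c).length = l.length := by
  simp [pvSubL]; omega

theorem pvGetElem_pvSubL (l : List Char) (m : Nat) (c : Char) (h : m < l.length)
    (i : Nat) (hi : i < (pvSubL l m c).length) :
    (pvSubL l m c)[i] = if i = m then c else l[i]'(by rw [pvLength_pvSubL l m c h] at hi; exact hi) := by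
  have hi' : i < l.length := by rw [pvLength_pvSubL l m c h] at hi; exact hi
  unfold pvSubL
  rcases lt_trichotomy i m with hlt | rfl | hgt
  · rw [List.getElem_append_left (by rw [List.length_take]; omega)]
    rw [List.getElem_take, if_neg (by omega)]
  · rw [List.getElem_append_right (by rw [List.length_take]; omega)]
    simp [List.length_take, Nat.min_eq_left (le_of_lt h)]
  · rw [List.getElem_append_right (by rw [List.length_take]; omega)]
    have hlen : (l.take m).length = m := by rw [List.length_take]; omega
    rw [if_neg (by omega)]
    have h1 : i - (l.take m).length = (i - m - 1) + 1 := by rw [hlen]; omega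
    simp only [h1, List.getElem_cons_succ, List.getElem_drop]
    congr 1; omega

theorem pvSubL_self (l : List Char) (m : Nat) (h : m < l.length) :
    pvSubL l m (l[m]) = l := by
  simp [pvSubL, ← List.drop_eq_getElem_cons h]

theorem pvTake_pvSubL (l : List Char) (m : Nat) (c : Char) (h : m ≤ l.length) :
    (pvSubL l m c).take m = l.take m := by
  unfold pvSubL
  rw [List.take_append]
  simp [List.length_take, Nat.min_eq_left h]

theorem pvDrop_pvSubL (l : List Char) (m : Nat) (c : Char) (h : m ≤ l.length) :
    (pvSubL l m c).drop (m + 1) = l.drop (m + 1) := by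
  unfold pvSubL
  rw [List.drop_append]
  simp [List.length_take, Nat.min_eq_left h]

theorem pvSubL_pvSubL (l : List Char) (m : Nat) (c c' : Char) (h : m < l.length) :
    pvSubL (pvSubL l m c) m c' = pvSubL l m c' := by
  conv_lhs => rw [pvSubL]
  rw [pvTake_pvSubL l m c (le_of_lt h), pvDrop_pvSubL l m c (le_of_lt h), pvSubL]

-- invariant relation: v agrees with s off P, and is I/L on P
def pvVRel (s v : List Char) (P : List Nat) : Prop :=
  v.length = s.length ∧ ∀ (m : Nat) (hv : m < v.length) (hs : m < s.length),
    (m ∈ P → pvIsIL v[m] = true) ∧ (m ∉ P → v[m] = s[m])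

theorem pvMem_foldl_add2 {α : Type} [BEq α] [LawfulBEq α] {β : Type}
    (l : List β) (f g : β → α) (acc : PySem.Set α) (y : α) :
    y ∈ l.foldl (fun s u => PySem.Set.add (PySem.Set.add s (f u)) (g u)) acc ↔
      y ∈ acc ∨ ∃ u ∈ l, y = f u ∨ y = g u := by
  induction l generalizing acc with
  | nil => simp
  | cons x t ih =>
    simp only [List.foldl_cons, ih, PySem.Set.mem_add, List.mem_cons]
    constructor
    · rintro (((h | h) | h) | ⟨u, hu, h⟩)
      · exact Or.inl h
      · exact Or.inr ⟨x, Or.inl rfl, Or.inl h⟩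
      · exact Or.inr ⟨x, Or.inl rfl, Or.inr h⟩
      · exact Or.inr ⟨u, Or.inr hu, h⟩
    · rintro (h | ⟨u, (rfl | hu), h⟩)
      · exact Or.inl (Or.inl (Or.inl h))
      · rcases h with h | h
        · exact Or.inl (Or.inl (Or.inr h))
        · exact Or.inl (Or.inr h)
      · exact Or.inr ⟨u, hu, h⟩

theorem pvNodup_foldl_add2 {α : Type} [BEq α] [LawfulBEq α] {β : Type}
    (l : List β) (f g : β → α) (acc : PySem.Set α) (h : acc.Nodup) :
    (l.foldl (fun s u => PySem.Set.add (PySem.Set.add s (f u)) (g u)) acc).Nodup := by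
  induction l generalizing acc with
  | nil => exact h
  | cons x t ih => exact ih _ (PySem.Set.nodup_add _ _ (PySem.Set.nodup_add _ _ h))

theorem pvMem_pvDouble (n : Int) (S : PySem.Set String) (v : String) :
    v ∈ pvDouble n S ↔ ∃ u ∈ S, v = pvSubAt u n "I" ∨ v = pvSubAt u n "L" := by
  simp [pvDouble, pvMem_foldl_add2]

-- substitution at an I/L position preserves the invariant, adding m to P
theorem pvVRel_subL (s w : List Char) (P : List Nat) (m : Nat) (hm : m < s.length)
    (hw : pvVRel s w P) (c : Char) (hc : pvIsIL c = true) :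
    pvVRel s (pvSubL w m c) (P ++ [m]) := by
  obtain ⟨hlen, hpt⟩ := hw
  have hmw : m < w.length := by omega
  refine ⟨by rw [pvLength_pvSubL _ _ _ hmw, hlen], ?_⟩
  intro i hv hs
  have hiw : i < w.length := by rw [pvLength_pvSubL _ _ _ hmw] at hv; exact hv
  rw [pvGetElem_pvSubL _ _ _ hmw i hv]
  by_cases him : i = m
  · subst him
    exact ⟨fun _ => by rw [if_pos rfl]; exact hc, fun hn => absurd (by simp) hn⟩
  · rw [if_neg him]
    refine ⟨fun hiP => ?_, fun hiP => ?_⟩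
    · have : i ∈ P := by
        rcases List.mem_append.mp hiP with h | h
        · exact h
        · exact absurd (List.mem_singleton.mp h) him
      exact (hpt i hiw hs).1 this
    · exact (hpt i hiw hs).2 (fun h => hiP (List.mem_append_left _ h))

-- conversely, a string satisfying the extended invariant comes from one satisfying pvVRel s · P
theorem pvVRel_subL_rev (s w : List Char) (P : List Nat) (m : Nat) (hm : m < s.length)
    (hIL : pvIsIL s[m] = true) (hw : pvVRel s w (P ++ [m])) :
    pvVRel s (pvSubL w m s[m]) P := by
  obtain ⟨hlen, hpt⟩ := hw
  have hmw : m < w.length := by omega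
  refine ⟨by rw [pvLength_pvSubL _ _ _ hmw, hlen], ?_⟩
  intro i hv hs
  have hiw : i < w.length := by rw [pvLength_pvSubL _ _ _ hmw] at hv; exact hv
  rw [pvGetElem_pvSubL _ _ _ hmw i hv]
  by_cases him : i = m
  · subst him
    exact ⟨fun _ => by rw [if_pos rfl]; exact hIL, fun _ => by rw [if_pos rfl]⟩
  · rw [if_neg him]
    refine ⟨fun hiP => (hpt i hiw hs).1 (List.mem_append_left _ hiP), fun hiP => ?_⟩
    exact (hpt i hiw hs).2 (fun h => by
      rcases List.mem_append.mp h with h' | h'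
      · exact hiP h'
      · exact him (List.mem_singleton.mp h'))

-- one doubling step moves the invariant from P to P ++ [m]
theorem pvStep_char (s : List Char) (m : Nat) (P : List Nat)
    (hm : m < s.length) (hIL : pvIsIL s[m] = true)
    (S : PySem.Set String) (hS : ∀ v : String, v ∈ S ↔ pvVRel s v.toList P) :
    ∀ v : String, v ∈ pvDouble (m : Int) S ↔ pvVRel s v.toList (P ++ [m]) := by
  intro v
  rw [pvMem_pvDouble]
  constructor
  · rintro ⟨u, hu, rfl | rfl⟩
    · rw [pvToList_pvSubAt' u m "I" 'I' (by decide)]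
      exact pvVRel_subL s u.toList P m hm ((hS u).mp hu) 'I' (by decide)
    · rw [pvToList_pvSubAt' u m "L" 'L' (by decide)]
      exact pvVRel_subL s u.toList P m hm ((hS u).mp hu) 'L' (by decide)
  · intro hrel
    have hmw : m < v.toList.length := by rw [hrel.1]; exact hm
    have hvm : pvIsIL (v.toList[m]'hmw) = true := (hrel.2 m hmw hm).1 (by simp)
    refine ⟨String.ofList (pvSubL v.toList m (s[m]'hm)), (hS _).mpr ?_, ?_⟩
    · rw [String.toList_ofList]
      exact pvVRel_subL_rev s v.toList P m hm hIL hrel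
    · have hor : v.toList[m]'hmw = 'I' ∨ v.toList[m]'hmw = 'L' := by
        rcases Bool.or_eq_true _ _ ▸ hvm with h | h
        · exact Or.inl (beq_iff_eq.mp h)
        · exact Or.inr (beq_iff_eq.mp h)
      have key : ∀ (cs : String) (c : Char), cs.toList = [c] → v.toList[m]'hmw = c →
          v = pvSubAt (String.ofList (pvSubL v.toList m (s[m]'hm))) (m : Int) cs := by
        intro cs c hcs hvc
        apply String.toList_inj.mp
        rw [pvToList_pvSubAt' _ m cs c hcs, String.toList_ofList,
          pvSubL_pvSubL _ _ _ _ hmw, ← hvc, pvSubL_self _ _ hmw]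
      rcases hor with h | h
      · exact Or.inl (key "I" 'I' (by decide) h)
      · exact Or.inr (key "L" 'L' (by decide) h)

-- the main invariant: folding pvDouble over the positions ns
theorem pvFold_char (s : List Char) (ns : List Nat) (P : List Nat)
    (hns : ∀ m ∈ ns, ∃ h : m < s.length, pvIsIL s[m] = true)
    (S : PySem.Set String) (hS : ∀ v : String, v ∈ S ↔ pvVRel s v.toList P) :
    ∀ v : String, v ∈ ns.foldl (fun S (m : Nat) => pvDouble (m : Int) S) S ↔
      pvVRel s v.toList (P ++ ns) := by
  induction ns generalizing S P with
  | nil => simpa using hS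
  | cons m t ih =>
    obtain ⟨hm, hIL⟩ := hns m (List.mem_cons_self)
    intro v
    have h1 := pvStep_char s m P hm hIL S hS
    have h2 := ih (P ++ [m]) (fun x hx => hns x (List.mem_cons_of_mem _ hx)) _ h1
    simpa using h2 v

theorem pvNodup_fold (ns : List Nat) (S : PySem.Set String) (h : S.Nodup) :
    (ns.foldl (fun S (m : Nat) => pvDouble (m : Int) S) S).Nodup := by
  induction ns generalizing S with
  | nil => exact h
  | cons m t ih => exact ih _ (pvNodup_foldl_add2 _ _ _ _ (by simp [PySem.Set.empty]))

theorem pvInnerGo_eq (Dm : PySem.Dict String String) (p : String) (res : List String)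
    (ks : List String) :
    pvInnerGo Dm p res ks = if ks ≠ [] ∧ Dm.contains p then res ++ [p] else res := by
  induction ks with
  | nil => simp [pvInnerGo]
  | cons k t ih =>
    rw [pvInnerGo]
    by_cases hc : Dm.contains p = true
    · simp [hc]
    · simp only [Bool.not_eq_true] at hc
      simp [hc, ih]

theorem pvFinalFold (Dm : PySem.Dict String String) (S : List String) (res : List String) :
    S.foldl (fun res p => pvInnerGo Dm p res Dm.keys) res
      = res ++ S.filter (fun p => Dm.contains p) := by
  induction S generalizing res with
  | nil => simp
  | cons p t ih =>
    rw [List.foldl_cons, ih, pvInnerGo_eq, List.filter_cons]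
    by_cases hc : Dm.contains p = true
    · have hne : Dm.keys ≠ [] := by
        have := (PySem.Dict.contains_iff_mem_keys Dm p).mp hc
        exact List.ne_nil_of_mem this
      simp [hc, hne]
    · simp only [Bool.not_eq_true] at hc
      simp [hc]

-- a Nodup list whose elements all equal k, containing k, is [k]
theorem pvSingleton_of (l : List String) (k : String) (hnd : l.Nodup)
    (hall : ∀ x ∈ l, x = k) (hk : k ∈ l) : l = [k] := by
  cases l with
  | nil => cases hk
  | cons a t =>
    have ha : a = k := hall a List.mem_cons_self
    subst ha
    cases t with
    | nil => rfl
    | cons b u =>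
      have hb : b = a := hall b (by simp)
      rw [List.nodup_cons] at hnd
      exact absurd (show a ∈ b :: u from hb ▸ List.mem_cons_self) hnd.1

-- membership in the I/L-position list
theorem pvMem_ns (s : List Char) (i : Nat) :
    i ∈ (List.range s.length).filter
        (fun m => s[m]? == some 'I' || s[m]? == some 'L') ↔
      ∃ h : i < s.length, pvIsIL s[i] = true := by
  rw [List.mem_filter, List.mem_range]
  constructor
  · rintro ⟨h1, h2⟩
    refine ⟨h1, ?_⟩
    rw [List.getElem?_eq_getElem h1] at h2
    simpa [pvIsIL] using h2
  · rintro ⟨h1, h2⟩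
    refine ⟨h1, ?_⟩
    rw [List.getElem?_eq_getElem h1]
    simpa [pvIsIL] using h2

-- the variant predicate, characterised pointwise on lists
theorem pvVariant_iff (pep k : String) :
    pvVariant pep k = true ↔ pvVRel pep.toList k.toList
      ((List.range pep.toList.length).filter
        (fun m => pep.toList[m]? == some 'I' || pep.toList[m]? == some 'L')) := by
  unfold pvVariant pvVRel
  rw [Bool.and_eq_true, beq_iff_eq, PySem.Str.len_eq, PySem.Str.len_eq, Int.natCast_inj,
    List.all_eq_true]
  constructor
  · rintro ⟨hlen, hall⟩
    refine ⟨hlen, ?_⟩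
    intro m hv hs
    have hz : (pep.toList[m]'hs, k.toList[m]'hv) ∈ pep.toList.zip k.toList := by
      rw [List.mem_iff_getElem]
      exact ⟨m, by rw [List.length_zip]; omega, by rw [List.getElem_zip]⟩
    have hp := hall _ hz
    simp only [Bool.or_eq_true, Bool.and_eq_true, beq_iff_eq] at hp
    constructor
    · intro hm
      obtain ⟨_, hil⟩ := (pvMem_ns pep.toList m).mp hm
      rcases hp with h | ⟨_, h⟩
      · rw [h]; exact hil
      · exact h
    · intro hm
      rcases hp with h | ⟨h, _⟩
      · exact h
      · exact absurd ((pvMem_ns pep.toList m).mpr ⟨hs, h⟩) hm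
  · rintro ⟨hlen, hpt⟩
    refine ⟨hlen, ?_⟩
    intro ab hab
    rw [List.mem_iff_getElem] at hab
    obtain ⟨m, hm, hab⟩ := hab
    have hs : m < pep.toList.length := by rw [List.length_zip] at hm; omega
    have hv : m < k.toList.length := by rw [List.length_zip] at hm; omega
    rw [List.getElem_zip] at hab
    subst hab
    simp only [Bool.or_eq_true, Bool.and_eq_true, beq_iff_eq]
    by_cases hil : pvIsIL (pep.toList[m]'hs) = true
    · exact Or.inr ⟨hil, (hpt m hv hs).1 ((pvMem_ns pep.toList m).mpr ⟨hs, hil⟩)⟩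
    · refine Or.inl ((hpt m hv hs).2 (fun hmem => ?_))
      obtain ⟨_, h⟩ := (pvMem_ns pep.toList m).mp hmem
      exact hil h

-- pvVRel with no processed positions says 'equal to pep'
theorem pvVRel_nil (s w : List Char) : pvVRel s w [] ↔ w = s := by
  unfold pvVRel
  constructor
  · rintro ⟨hl, hp⟩
    exact List.ext_getElem hl (fun i h1 h2 => (hp i h1 h2).2 (by simp))
  · rintro rfl
    exact ⟨rfl, fun m h1 h2 => ⟨fun h => absurd h (by simp), fun _ => rfl⟩⟩

-- under Pre_ (at most one matching key) the two filtered lists coincide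
theorem pvAssemble (K S : List String) (pv : String → Bool) (hS : S.Nodup)
    (hchar : ∀ v, v ∈ S ↔ pv v = true)
    (hPre : (K.filter pv).length ≤ 1) :
    S.filter (fun p => decide (p ∈ K)) = K.filter pv := by
  cases hM : K.filter pv with
  | nil =>
    refine List.filter_eq_nil_iff.mpr (fun p hp => ?_)
    simp only [decide_eq_true_eq]
    intro hpK
    have : p ∈ K.filter pv := List.mem_filter.mpr ⟨hpK, (hchar p).mp hp⟩
    rw [hM] at this
    cases this
  | cons k t =>
    have ht : t = [] := by
      have := hM ▸ hPre
      simp only [List.length_cons] at this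
      exact List.eq_nil_of_length_eq_zero (by omega)
    subst ht
    have hkM : k ∈ K.filter pv := hM ▸ List.mem_cons_self
    have hkK : k ∈ K := List.mem_of_mem_filter hkM
    have hkv : pv k = true := List.of_mem_filter hkM
    apply pvSingleton_of
    · exact hS.filter _
    · intro x hx
      have hxS := List.mem_of_mem_filter hx
      have hxK : x ∈ K := by simpa using List.of_mem_filter hx
      have : x ∈ K.filter pv := List.mem_filter.mpr ⟨hxK, (hchar x).mp hxS⟩
      rw [hM] at this
      simpa using this
    · exact List.mem_filter.mpr ⟨(hchar k).mpr hkv, by simp [hkK]⟩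

-- A's first loop computes exactly the I/L positions of pep (as Ints)
theorem pvL_eq (pep : String) :
    (PySem.List.pyRange 0 (PySem.Str.len pep) 1).foldl
      (fun acc i =>
        if PySem.Str.pyGet? pep i == some 'I' || PySem.Str.pyGet? pep i == some 'L'
        then acc ++ [i] else acc) []
    = List.map (fun m : Nat => (m : Int))
        ((List.range pep.toList.length).filter
          (fun m => pep.toList[m]? == some 'I' || pep.toList[m]? == some 'L')) := by
  rw [PySem.List.foldl_append_if
      (fun i => PySem.Str.pyGet? pep i == some 'I' || PySem.Str.pyGet? pep i == some 'L')
      (fun i => i), List.nil_append, PySem.Str.len_eq, PySem.List.pyRange_zero_natCast,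
    List.filter_map, List.map_map]
  rw [List.filter_congr (q := fun m => pep.toList[m]? == some 'I' || pep.toList[m]? == some 'L')
      (fun m _ => by simp [Function.comp])]
  rfl

-- ===== VERDICT (by name: the statement is the Claim_ definition above) =====
theorem check_IL_spec : Claim_equal_check_IL := by
  intro pep D _ hPre
  unfold Pre_check_IL at hPre
  unfold Spec_check_IL check_IL check_IL_alt
  simp only [pvL_eq]
  rw [PySem.List.foldl_pyRange_zero_pyGetD _ 0 (fun S n => pvDouble n S), List.foldl_map,
    pvFinalFold, List.nil_append]
  have hf : (fun p => (PySem.Dict.ofList D).contains p)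
      = (fun p => decide (p ∈ (PySem.Dict.ofList D).keys)) :=
    funext fun p => PySem.Dict.contains_eq_decide_mem_keys _ p
  rw [hf]
  set ns := (List.range pep.toList.length).filter
      (fun m => pep.toList[m]? == some 'I' || pep.toList[m]? == some 'L') with hns
  have hS0 : ∀ v : String, v ∈ PySem.Set.add PySem.Set.empty pep ↔
      pvVRel pep.toList v.toList [] := by
    intro v
    rw [PySem.Set.mem_add, pvVRel_nil]
    constructor
    · rintro (h | rfl)
      · cases h
      · rfl
    · intro h
      exact Or.inr (String.toList_inj.mp h)
  have hchar := pvFold_char pep.toList ns []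
    (fun m hm => (pvMem_ns pep.toList m).mp hm) _ hS0
  rw [List.nil_append] at hchar
  exact pvAssemble _ _ _ (pvNodup_fold ns _ (by simp [PySem.Set.empty]))
    (fun v => (hchar v).trans (pvVariant_iff pep v).symm) hPre
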